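-- pv_equiv track=rewrite | github.com/aradmehralian/MRI-Denoising | src/Filters/Adaptive_Median.py | level_A
-- ===== SOURCE A (Python) =====
-- def level_B(z_min: int, z_med: int, z_max: int, z_xy: int) -> int:
--     if (z_min < z_xy < z_max):
--         return z_xy
--     else:
--         return z_med
--
-- def level_A(z_min: int, z_med: int, z_max: int, z_xy: int, S_xy: int, S_max: int):
--     if(z_min < z_med < z_max):
--         return level_B(z_min, z_med, z_max, z_xy)
--     else:
--         S_xy += 2 # increase the size of S_xy to the next odd value.
--         if (S_xy <= S_max): # repeat process
--             return level_A(z_min, z_med, z_max, z_xy, S_xy, S_max)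
--         else:
--             return z_med
-- ===== SOURCE B (Python) =====
-- def level_A(z_min: int, z_med: int, z_max: int, z_xy: int, S_xy: int, S_max: int):
--     # The recursion in A never changes the test z_min < z_med < z_max, so the
--     # window-growing loop is pure delay: the answer is a closed-form conditional.
--     if z_min < z_med < z_max:
--         return z_xy if z_min < z_xy < z_max else z_med
--     return z_med
-- ===== Notes on version B (the rewrite author's own statement) =====
-- stated objective: faster
-- what changed: Replaced A's tail recursion that grows S_xy by 2 until it exceeds S_max with a closed-form conditional: the recursion never changes its branch condition, so the loop is pure delay and the result is z_xy/z_med directly.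
-- outside the precondition, e.g. on level_A(0, 5, 1, 3, 0, 1500): A returns 5, B returns 5
import Mathlib
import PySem

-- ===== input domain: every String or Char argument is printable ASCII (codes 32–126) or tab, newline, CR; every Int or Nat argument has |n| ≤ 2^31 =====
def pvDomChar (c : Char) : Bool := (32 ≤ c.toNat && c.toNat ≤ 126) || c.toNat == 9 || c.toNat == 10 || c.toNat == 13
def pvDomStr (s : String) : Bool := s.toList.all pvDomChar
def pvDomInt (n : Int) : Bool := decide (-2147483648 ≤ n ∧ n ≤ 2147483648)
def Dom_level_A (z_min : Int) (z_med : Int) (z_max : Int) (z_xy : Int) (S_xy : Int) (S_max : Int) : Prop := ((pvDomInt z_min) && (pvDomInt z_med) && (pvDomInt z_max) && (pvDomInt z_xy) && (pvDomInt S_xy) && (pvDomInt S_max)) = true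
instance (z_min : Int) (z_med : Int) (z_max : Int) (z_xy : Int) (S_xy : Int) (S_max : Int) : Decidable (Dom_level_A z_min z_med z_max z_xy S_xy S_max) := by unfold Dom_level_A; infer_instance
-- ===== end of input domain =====

-- B replaces A's S_xy-growing tail recursion (whose branch condition never changes) by a
-- closed-form conditional; a timing run measures whether this is faster on large gaps.

-- ===== PORT A =====
def level_B (z_min : Int) (z_med : Int) (z_max : Int) (z_xy : Int) : Int :=
  if z_min < z_xy ∧ z_xy < z_max then z_xy else z_med

def level_A (z_min : Int) (z_med : Int) (z_max : Int) (z_xy : Int) (S_xy : Int) (S_max : Int) : Int :=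
  if z_min < z_med ∧ z_med < z_max then
    level_B z_min z_med z_max z_xy
  else
    if S_xy + 2 ≤ S_max then
      level_A z_min z_med z_max z_xy (S_xy + 2) S_max
    else
      z_med
termination_by (S_max - S_xy).toNat
decreasing_by omega

-- ===== PORT B =====
def level_A_alt (z_min : Int) (z_med : Int) (z_max : Int) (z_xy : Int) (S_xy : Int) (S_max : Int) : Int :=
  if z_min < z_med ∧ z_med < z_max then
    if z_min < z_xy ∧ z_xy < z_max then z_xy else z_med
  else
    z_med

-- ===== PRECONDITION & SPEC =====
-- Pre_ excludes inputs where A's tail recursion (one call per S_xy += 2 step) is deep enough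
-- to hit CPython's recursion limit and raise RecursionError; the bound 1000 is conservative.
def Pre_level_A (z_min : Int) (z_med : Int) (z_max : Int) (z_xy : Int) (S_xy : Int) (S_max : Int) : Prop :=
  (z_min < z_med ∧ z_med < z_max) ∨ S_max - S_xy ≤ 1000
instance (z_min : Int) (z_med : Int) (z_max : Int) (z_xy : Int) (S_xy : Int) (S_max : Int) : Decidable (Pre_level_A z_min z_med z_max z_xy S_xy S_max) := by unfold Pre_level_A; infer_instance
def pvWitness_level_A : Int × Int × Int × Int × Int × Int := (0, 5, 1, 3, 3, 9)

def Spec_level_A (z_min : Int) (z_med : Int) (z_max : Int) (z_xy : Int) (S_xy : Int) (S_max : Int) (out : Int) : Prop := out = level_A_alt z_min z_med z_max z_xy S_xy S_max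
instance (z_min : Int) (z_med : Int) (z_max : Int) (z_xy : Int) (S_xy : Int) (S_max : Int) (out : Int) : Decidable (Spec_level_A z_min z_med z_max z_xy S_xy S_max out) := by unfold Spec_level_A; infer_instance

-- ===== CLAIM =====
def Claim_equal_level_A : Prop := ∀ (z_min : Int) (z_med : Int) (z_max : Int) (z_xy : Int) (S_xy : Int) (S_max : Int), Dom_level_A z_min z_med z_max z_xy S_xy S_max → Pre_level_A z_min z_med z_max z_xy S_xy S_max → Spec_level_A z_min z_med z_max z_xy S_xy S_max (level_A z_min z_med z_max z_xy S_xy S_max)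

-- ===== LEMMAS AND PROOFS =====
theorem level_A_eq_alt (z_min z_med z_max z_xy S_xy S_max : Int) :
    level_A z_min z_med z_max z_xy S_xy S_max = level_A_alt z_min z_med z_max z_xy S_xy S_max := by
  fun_induction level_A z_min z_med z_max z_xy S_xy S_max <;>
    simp_all [level_A_alt, level_B]

-- ===== VERDICT =====
theorem level_A_spec : Claim_equal_level_A := by
  intro z_min z_med z_max z_xy S_xy S_max _ _
  exact level_A_eq_alt z_min z_med z_max z_xy S_xy S_max
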